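-- pv_equiv track=rewrite | github.com/Hanceptron/reclass | class_recorder/utils.py | _chunk_by_units
-- ===== SOURCE A (Python) =====
-- from typing import Iterable, List
--
-- def _chunk_by_units(units: List[str], max_chars: int, overlap_units: int, join_with: str = '\n\n') -> List[str]:
--     """
--     Generic chunking for any text units (paragraphs or sentences).
--
--     Args:
--         units: List of text units to chunk (paragraphs, sentences, etc.)
--         max_chars: Maximum characters per chunk
--         overlap_units: Number of units to overlap between chunks
--         join_with: String to join units with ('\n\n' for paragraphs, ' ' for sentences)
--
--     Returns:
--         List of text chunks with overlap
--     """
--     if not units: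
--         return []
--
--     chunks: List[str] = []
--     current: List[str] = []
--     current_len = 0
--
--     for unit in units:
--         unit_len = len(unit) + len(join_with)  # Account for separator
--
--         # If adding this unit exceeds max_chars and we have content, finalize chunk
--         if current and current_len + unit_len > max_chars:
--             chunks.append(join_with.join(current))
--
--             # Keep last N units for overlap
--             if overlap_units > 0 and len(current) > overlap_units:
--                 current = current[-overlap_units:]
--                 current_len = sum(len(p) + len(join_with) for p in current)
--             else:
--                 current = []
--                 current_len = 0
--
--         current.append(unit)
--         current_len += unit_len
--
--     # Add remaining content
--     if current:
--         chunks.append(join_with.join(current))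
--
--     return chunks
-- ===== SOURCE B (Python) =====
-- from typing import List
--
-- def _chunk_by_units(units: List[str], max_chars: int, overlap_units: int, join_with: str = '\n\n') -> List[str]:
--     """Per-chunk recursion instead of a per-unit accumulator loop: each round
--     greedily pops the units of one chunk off a stack of remaining units; the
--     overlap carry plus the triggering unit are passed explicitly to the next round."""
--     if not units:
--         return []
--     sep = len(join_with)
--     stack = units[:0:-1]  # remaining units, reversed so pop() yields the next one
--     carry = [units[0]]
--     chunks = []
--     while True:
--         clen = sum(len(u) + sep for u in carry)
--         taken = []
--         while stack and clen + len(stack[-1]) + sep <= max_chars: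
--             u = stack.pop()
--             clen += len(u) + sep
--             taken.append(u)
--         chunk_units = carry + taken
--         chunks.append(join_with.join(chunk_units))
--         if not stack:
--             return chunks
--         trigger = stack.pop()
--         if overlap_units > 0 and len(chunk_units) > overlap_units:
--             carry = chunk_units[-overlap_units:] + [trigger]
--         else:
--             carry = [trigger]
-- ===== Notes on version B (the rewrite author's own statement) =====
-- stated objective: alternative
-- what changed: Replaces A's single per-unit fold with a mutable current-buffer/flush state by a per-chunk recursion: a greedy_split helper slices off each chunk's units in one go, and the overlap carry plus triggering unit are passed explicitly to the next round.
import Mathlib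
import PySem

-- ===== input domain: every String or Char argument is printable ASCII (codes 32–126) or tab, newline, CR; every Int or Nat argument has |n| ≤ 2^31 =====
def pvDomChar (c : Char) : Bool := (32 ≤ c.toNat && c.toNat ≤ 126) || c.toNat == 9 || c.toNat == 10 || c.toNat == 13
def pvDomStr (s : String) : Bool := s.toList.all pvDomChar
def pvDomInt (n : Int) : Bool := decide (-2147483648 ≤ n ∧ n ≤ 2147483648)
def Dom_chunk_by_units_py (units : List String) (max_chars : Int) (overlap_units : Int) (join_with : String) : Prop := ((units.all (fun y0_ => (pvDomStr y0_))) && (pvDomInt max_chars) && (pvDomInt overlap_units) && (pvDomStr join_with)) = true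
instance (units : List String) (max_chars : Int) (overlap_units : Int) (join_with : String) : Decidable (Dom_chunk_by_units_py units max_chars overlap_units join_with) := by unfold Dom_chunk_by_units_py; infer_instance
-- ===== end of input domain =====

-- B replaces A's per-unit accumulator loop by per-chunk recursion (greedily split off
-- one chunk at a time); same return value, objective: alternative decomposition.

-- sum(len(p) + len(join_with) for p in l)  — appears verbatim in both Pythons
def pvSum (sep : Int) (l : List String) : Int :=
  (l.map (fun u => PySem.Str.len u + sep)).sum

-- ===== PORT A =====
-- state = (chunks, current, current_len); one fold step = one iteration of A's for-loop
def pvStepA (max_chars overlap_units : Int) (join_with : String)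
    (st : List String × List String × Int) (unit : String) :
    List String × List String × Int :=
  let unit_len := PySem.Str.len unit + PySem.Str.len join_with
  if st.2.1 ≠ [] ∧ st.2.2 + unit_len > max_chars then
    let chunks := st.1 ++ [PySem.Str.join join_with st.2.1]
    if overlap_units > 0 ∧ (st.2.1.length : Int) > overlap_units then
      let cur := PySem.List.slice st.2.1 (some (-overlap_units)) none
      (chunks, cur ++ [unit], pvSum (PySem.Str.len join_with) cur + unit_len)
    else
      (chunks, [unit], 0 + unit_len)
  else
    (st.1, st.2.1 ++ [unit], st.2.2 + unit_len)

def chunk_by_units_py (units : List String) (max_chars : Int) (overlap_units : Int) (join_with : String) : List String :=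
  if units = [] then []
  else
    let st := units.foldl (pvStepA max_chars overlap_units join_with) ([], [], 0)
    if st.2.1 ≠ [] then st.1 ++ [PySem.Str.join join_with st.2.1] else st.1

-- ===== PORT B =====
-- Source B's inner while: pop units off the stack of remaining units while they fit;
-- the stack is modelled as a List whose head is the next unit to pop
def pvGreedySplit (max_chars sep : Int) : Int → List String → List String × List String
  | _, [] => ([], [])
  | clen, u :: rs =>
    if clen + (PySem.Str.len u + sep) ≤ max_chars then
      let p := pvGreedySplit max_chars sep (clen + (PySem.Str.len u + sep)) rs
      (u :: p.1, p.2)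
    else ([], u :: rs)

-- the while-True loop of Source B: one recursion step = one emitted chunk
-- (fuel bounds the number of rounds; the stack shrinks each round, so rest.length + 1 suffices)
def pvLoopB (max_chars overlap_units : Int) (join_with : String) :
    Nat → List String → List String → List String
  | 0, _, _ => []
  | fuel + 1, carry, rest =>
    let sep := PySem.Str.len join_with
    let p := pvGreedySplit max_chars sep (pvSum sep carry) rest
    let chunk_units := carry ++ p.1
    let chunk := PySem.Str.join join_with chunk_units
    match p.2 with
    | [] => [chunk]
    | trigger :: rest' =>
      let carry' :=
        if overlap_units > 0 ∧ (chunk_units.length : Int) > overlap_units then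
          PySem.List.slice chunk_units (some (-overlap_units)) none ++ [trigger]
        else [trigger]
      chunk :: pvLoopB max_chars overlap_units join_with fuel carry' rest'

def chunk_by_units_py_alt (units : List String) (max_chars : Int) (overlap_units : Int) (join_with : String) : List String :=
  match units with
  | [] => []
  | u :: rest => pvLoopB max_chars overlap_units join_with (rest.length + 1) [u] rest

-- ===== PRECONDITION & SPEC =====
def Spec_chunk_by_units_py (units : List String) (max_chars : Int) (overlap_units : Int) (join_with : String) (out : List String) : Prop := out = chunk_by_units_py_alt units max_chars overlap_units join_with
instance (units : List String) (max_chars : Int) (overlap_units : Int) (join_with : String) (out : List String) : Decidable (Spec_chunk_by_units_py units max_chars overlap_units join_with out) := by unfold Spec_chunk_by_units_py; infer_instance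

-- ===== CLAIM (what is proved, stated in full; the proofs are below) =====
def Claim_equal_chunk_by_units_py : Prop := ∀ (units : List String) (max_chars : Int) (overlap_units : Int) (join_with : String), Dom_chunk_by_units_py units max_chars overlap_units join_with → Spec_chunk_by_units_py units max_chars overlap_units join_with (chunk_by_units_py units max_chars overlap_units join_with)

-- ===== LEMMAS AND PROOFS =====

theorem pvSum_append (sep : Int) (l : List String) (u : String) :
    pvSum sep (l ++ [u]) = pvSum sep l + (PySem.Str.len u + sep) := by
  simp [pvSum]

-- extension: a unit that fits may be moved from the pending rest into the carry
theorem pvLoopB_ext (max_chars overlap_units : Int) (join_with : String) (f : Nat)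
    (carry : List String) (u : String) (rs : List String)
    (h : pvSum (PySem.Str.len join_with) carry + (PySem.Str.len u + PySem.Str.len join_with) ≤ max_chars) :
    pvLoopB max_chars overlap_units join_with (f + 1) carry (u :: rs)
      = pvLoopB max_chars overlap_units join_with (f + 1) (carry ++ [u]) rs := by
  simp only [pvLoopB, pvGreedySplit, if_pos h, pvSum_append, List.append_assoc,
    List.singleton_append]

-- main simulation: A's fold from a mid-state equals B's per-chunk loop
theorem pv_main (max_chars overlap_units : Int) (join_with : String) :
    ∀ (rest : List String) (fuel : Nat) (carry chunks : List String),
      carry ≠ [] → rest.length < fuel →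
      (let st := rest.foldl (pvStepA max_chars overlap_units join_with)
                  (chunks, carry, pvSum (PySem.Str.len join_with) carry)
       if st.2.1 ≠ [] then st.1 ++ [PySem.Str.join join_with st.2.1] else st.1)
      = chunks ++ pvLoopB max_chars overlap_units join_with fuel carry rest := by
  intro rest
  induction rest with
  | nil =>
    intro fuel carry chunks hc hf
    obtain ⟨f, rfl⟩ : ∃ f, fuel = f + 1 := ⟨fuel - 1, by omega⟩
    simp [pvLoopB, pvGreedySplit, hc]
  | cons u rs ih =>
    intro fuel carry chunks hc hf
    obtain ⟨f, rfl⟩ : ∃ f, fuel = f + 1 := ⟨fuel - 1, by omega⟩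
    by_cases h : pvSum (PySem.Str.len join_with) carry + (PySem.Str.len u + PySem.Str.len join_with) ≤ max_chars
    · -- fits: A appends to current, B extends the carry
      rw [List.foldl_cons]
      have hstep : pvStepA max_chars overlap_units join_with
          (chunks, carry, pvSum (PySem.Str.len join_with) carry) u
          = (chunks, carry ++ [u], pvSum (PySem.Str.len join_with) (carry ++ [u])) := by
        simp only [pvStepA]
        rw [if_neg (by rintro ⟨-, hgt⟩; omega), pvSum_append]
      rw [hstep, ih (f + 1) (carry ++ [u]) chunks (by simp) (by simp at hf ⊢; omega),
        ← pvLoopB_ext max_chars overlap_units join_with f carry u rs h]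
    · -- overflow: A flushes the chunk, B closes the current round
      rw [List.foldl_cons]
      have hf' : rs.length < f := by simp at hf; omega
      by_cases hov : overlap_units > 0 ∧ ((carry.length : Int) > overlap_units)
      · have hstep : pvStepA max_chars overlap_units join_with
            (chunks, carry, pvSum (PySem.Str.len join_with) carry) u
            = (chunks ++ [PySem.Str.join join_with carry],
               PySem.List.slice carry (some (-overlap_units)) none ++ [u],
               pvSum (PySem.Str.len join_with)
                 (PySem.List.slice carry (some (-overlap_units)) none ++ [u])) := by
          simp only [pvStepA]
          rw [if_pos ⟨hc, by omega⟩, if_pos hov, pvSum_append]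
        rw [hstep, ih f _ _ (by simp) hf']
        conv_rhs => rw [pvLoopB]
        simp only [pvGreedySplit]
        rw [if_neg h]
        simp only [List.append_nil]
        rw [if_pos hov]
        simp
      · have hstep : pvStepA max_chars overlap_units join_with
            (chunks, carry, pvSum (PySem.Str.len join_with) carry) u
            = (chunks ++ [PySem.Str.join join_with carry], [u],
               pvSum (PySem.Str.len join_with) [u]) := by
          simp only [pvStepA]
          rw [if_pos ⟨hc, by omega⟩, if_neg hov]
          simp [pvSum]
        rw [hstep, ih f _ _ (by simp) hf']
        conv_rhs => rw [pvLoopB]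
        simp only [pvGreedySplit]
        rw [if_neg h]
        simp only [List.append_nil]
        rw [if_neg hov]
        simp

-- ===== VERDICT (by name: the statement is the Claim_ definition above) =====
theorem chunk_by_units_py_spec : Claim_equal_chunk_by_units_py := by
  intro units max_chars overlap_units join_with _
  unfold Spec_chunk_by_units_py chunk_by_units_py chunk_by_units_py_alt
  cases units with
  | nil => simp
  | cons u rest =>
    simp only [if_neg (by simp : ¬ (u :: rest = []))]
    rw [List.foldl_cons]
    have hstep : pvStepA max_chars overlap_units join_with ([], [], 0) u
        = ([], [u], pvSum (PySem.Str.len join_with) [u]) := by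
      simp [pvStepA, pvSum]
    rw [hstep]
    simpa using pv_main max_chars overlap_units join_with rest (rest.length + 1) [u] []
      (by simp) (by omega)
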